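-- pv_equiv track=rewrite | github.com/RingCanary/coral-usb-oxidized | tools/instruction_word_field_analysis.py | _changed_lane_indexes
-- ===== SOURCE A (Python) =====
-- from typing import Any, Dict, List, Optional, Sequence, Tuple
--
-- def _changed_lane_indexes(values_by_dim: Sequence[List[int]]) -> List[int]:
--     count = min(len(v) for v in values_by_dim)
--     out: List[int] = []
--     for idx in range(count):
--         vals = {v[idx] for v in values_by_dim}
--         if len(vals) > 1:
--             out.append(idx)
--     return out
-- ===== SOURCE B (Python) =====
-- from typing import List, Sequence
--
--
-- def _changed_lane_indexes(values_by_dim: Sequence[List[int]]) -> List[int]: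
--     count = min(len(v) for v in values_by_dim)
--     ref = values_by_dim[0]
--     changed = set()
--     for row in values_by_dim[1:]:
--         for idx in range(count):
--             if row[idx] != ref[idx]:
--                 changed.add(idx)
--     return sorted(changed)
-- ===== Notes on version B (the rewrite author's own statement) =====
-- stated objective: alternative
-- what changed: Row-major traversal against the first row as reference, accumulating one set of changed column indices and sorting it at the end, instead of building a distinct-value set per column in column-major order.
import Mathlib
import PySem

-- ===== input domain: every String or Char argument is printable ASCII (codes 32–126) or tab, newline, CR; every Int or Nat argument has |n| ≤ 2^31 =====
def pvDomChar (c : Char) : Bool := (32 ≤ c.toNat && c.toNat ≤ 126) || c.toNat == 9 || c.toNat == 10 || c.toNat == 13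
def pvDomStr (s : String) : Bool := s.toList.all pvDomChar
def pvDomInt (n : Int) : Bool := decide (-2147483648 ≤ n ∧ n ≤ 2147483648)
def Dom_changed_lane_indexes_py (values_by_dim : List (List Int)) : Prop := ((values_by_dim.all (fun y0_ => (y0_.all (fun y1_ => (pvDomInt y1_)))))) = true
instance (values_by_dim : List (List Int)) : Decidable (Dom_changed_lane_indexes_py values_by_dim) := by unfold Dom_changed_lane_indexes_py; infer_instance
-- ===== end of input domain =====

-- B flips the traversal to row-major against the first row as reference, maintaining one set of
-- changed indices sorted at the end (alternative decomposition, same cost).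


-- ===== PORT A =====
def changed_lane_indexes_py (values_by_dim : List (List Int)) : List Int :=
  let count : Int :=
    ((PySem.List.min? (values_by_dim.map (fun v => (v.length : Int))) (fun x => x)).getD 0)
  (PySem.List.pyRange 0 count 1).foldl
    (fun out idx =>
      let vals : PySem.Set Int :=
        PySem.Set.ofList (values_by_dim.map (fun v => PySem.List.pyGetD v idx 0))
      if 1 < vals.length then out ++ [idx] else out)
    []

-- ===== PORT B =====
def changed_lane_indexes_py_alt (values_by_dim : List (List Int)) : List Int :=
  match values_by_dim with
  | [] => []  -- unreachable under Pre_ (Python raises ValueError on the empty input)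
  | ref :: rest =>
    let count : Int :=
      ((PySem.List.min? ((ref :: rest).map (fun v => (v.length : Int))) (fun x => x)).getD 0)
    let changed : PySem.Set Int :=
      rest.foldl
        (fun ch row =>
          (PySem.List.pyRange 0 count 1).foldl
            (fun ch idx =>
              if PySem.List.pyGetD row idx 0 ≠ PySem.List.pyGetD ref idx 0
              then PySem.Set.add ch idx else ch)
            ch)
        PySem.Set.empty
    PySem.List.sorted changed (fun x => x) false

-- ===== PRECONDITION & SPEC =====
-- Python A raises ValueError (min of an empty sequence) exactly on the empty list.
def Pre_changed_lane_indexes_py (values_by_dim : List (List Int)) : Prop := values_by_dim ≠ []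
instance (values_by_dim : List (List Int)) : Decidable (Pre_changed_lane_indexes_py values_by_dim) := by unfold Pre_changed_lane_indexes_py; infer_instance
def pvWitness_changed_lane_indexes_py : List (List Int) := [[1, 2, 3], [1, 5, 3]]

def Spec_changed_lane_indexes_py (values_by_dim : List (List Int)) (out : List Int) : Prop := out = changed_lane_indexes_py_alt values_by_dim
instance (values_by_dim : List (List Int)) (out : List Int) : Decidable (Spec_changed_lane_indexes_py values_by_dim out) := by unfold Spec_changed_lane_indexes_py; infer_instance

-- ===== CLAIM (what is proved, stated in full; the proofs are below) =====
def Claim_equal_changed_lane_indexes_py : Prop := ∀ (values_by_dim : List (List Int)), Dom_changed_lane_indexes_py values_by_dim → Pre_changed_lane_indexes_py values_by_dim → Spec_changed_lane_indexes_py values_by_dim (changed_lane_indexes_py values_by_dim)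

-- ===== LEMMAS AND PROOFS =====

-- the Bool predicate "some remaining row differs from the reference at idx"
def pvDiffB (rest : List (List Int)) (ref : List Int) (idx : Int) : Bool :=
  rest.any (fun row => PySem.List.pyGetD row idx 0 != PySem.List.pyGetD ref idx 0)

-- a distinct-value set over a :: l has more than one element iff some l-element differs from a
lemma pv_card_gt_one_iff (a : Int) (l : List Int) :
    1 < (PySem.Set.ofList (a :: l)).length ↔ ∃ x ∈ l, x ≠ a := by
  have hnd : (PySem.Set.ofList (a :: l)).Nodup := PySem.Set.nodup_ofList _
  have hmem : ∀ y, y ∈ PySem.Set.ofList (a :: l) ↔ y = a ∨ y ∈ l := by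
    intro y; rw [PySem.Set.mem_ofList]; simp
  constructor
  · intro h
    by_contra hne
    push Not at hne
    have hall : ∀ y ∈ PySem.Set.ofList (a :: l), y = a := by
      intro y hy
      rcases (hmem y).1 hy with h1 | h1
      · exact h1
      · exact hne y h1
    match hs : PySem.Set.ofList (a :: l) with
    | [] => rw [hs] at h; simp at h
    | [x] => rw [hs] at h; simp at h
    | x :: y :: t =>
      rw [hs] at hnd hall
      have hx := hall x (by simp)
      have hy := hall y (by simp)
      have := (List.nodup_cons.1 hnd).1
      simp [hx, hy] at this
  · rintro ⟨x, hx, hne⟩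
    have ha : a ∈ PySem.Set.ofList (a :: l) := (hmem a).2 (Or.inl rfl)
    have hxm : x ∈ PySem.Set.ofList (a :: l) := (hmem x).2 (Or.inr hx)
    match hs : PySem.Set.ofList (a :: l) with
    | [] => rw [hs] at ha; simp at ha
    | [y] =>
      rw [hs] at ha hxm; simp at ha hxm
      exact absurd (hxm.trans ha.symm) hne
    | y :: z :: t => simp

-- inner loop of B: membership in the per-row fold
lemma pv_inner_mem (row ref : List Int) (l : List Int) (ch : PySem.Set Int) (y : Int) :
    (y ∈ l.foldl
        (fun ch idx =>
          if PySem.List.pyGetD row idx 0 ≠ PySem.List.pyGetD ref idx 0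
          then PySem.Set.add ch idx else ch) ch)
      ↔ y ∈ ch ∨ (y ∈ l ∧ PySem.List.pyGetD row y 0 ≠ PySem.List.pyGetD ref y 0) := by
  induction l generalizing ch with
  | nil => simp
  | cons x xs ih =>
    simp only [List.foldl_cons]
    by_cases hx : PySem.List.pyGetD row x 0 ≠ PySem.List.pyGetD ref x 0
    · rw [if_pos hx, ih]
      rw [PySem.Set.mem_add]
      constructor
      · rintro (⟨h | rfl⟩ | h)
        · exact Or.inl h
        · exact Or.inr ⟨by simp, hx⟩
        · exact Or.inr ⟨by simp [h.1], h.2⟩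
      · rintro (h | ⟨hy, hd⟩)
        · exact Or.inl (Or.inl h)
        · rcases List.mem_cons.1 hy with rfl | hy
          · exact Or.inl (Or.inr rfl)
          · exact Or.inr ⟨hy, hd⟩
    · rw [if_neg hx, ih]
      constructor
      · rintro (h | ⟨hy, hd⟩)
        · exact Or.inl h
        · exact Or.inr ⟨by simp [hy], hd⟩
      · rintro (h | ⟨hy, hd⟩)
        · exact Or.inl h
        · rcases List.mem_cons.1 hy with rfl | hy
          · exact absurd hd hx
          · exact Or.inr ⟨hy, hd⟩

-- inner loop preserves Nodup
lemma pv_inner_nodup (row ref : List Int) (l : List Int) (ch : PySem.Set Int)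
    (h : ch.Nodup) :
    (l.foldl
        (fun ch idx =>
          if PySem.List.pyGetD row idx 0 ≠ PySem.List.pyGetD ref idx 0
          then PySem.Set.add ch idx else ch) ch).Nodup := by
  induction l generalizing ch with
  | nil => exact h
  | cons x xs ih =>
    simp only [List.foldl_cons]
    split_ifs with hx
    · exact ih _ (PySem.Set.nodup_add _ _ h)
    · exact ih _ h

-- outer loop of B: membership in the accumulated changed set
lemma pv_outer_mem (ref : List Int) (rest : List (List Int)) (r : List Int)
    (ch : PySem.Set Int) (y : Int) :
    (y ∈ rest.foldl
        (fun ch row =>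
          r.foldl
            (fun ch idx =>
              if PySem.List.pyGetD row idx 0 ≠ PySem.List.pyGetD ref idx 0
              then PySem.Set.add ch idx else ch) ch) ch)
      ↔ y ∈ ch ∨ (y ∈ r ∧ ∃ row ∈ rest, PySem.List.pyGetD row y 0 ≠ PySem.List.pyGetD ref y 0) := by
  induction rest generalizing ch with
  | nil => simp
  | cons row rows ih =>
    simp only [List.foldl_cons]
    rw [ih, pv_inner_mem]
    constructor
    · rintro ((h | ⟨hr, hd⟩) | ⟨hr, row', hrow', hd⟩)
      · exact Or.inl h
      · exact Or.inr ⟨hr, row, by simp, hd⟩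
      · exact Or.inr ⟨hr, row', by simp [hrow'], hd⟩
    · rintro (h | ⟨hr, row', hrow', hd⟩)
      · exact Or.inl (Or.inl h)
      · rcases List.mem_cons.1 hrow' with rfl | hrow'
        · exact Or.inl (Or.inr ⟨hr, hd⟩)
        · exact Or.inr ⟨hr, row', hrow', hd⟩

lemma pv_outer_nodup (ref : List Int) (rest : List (List Int)) (r : List Int)
    (ch : PySem.Set Int) (h : ch.Nodup) :
    (rest.foldl
        (fun ch row =>
          r.foldl
            (fun ch idx =>
              if PySem.List.pyGetD row idx 0 ≠ PySem.List.pyGetD ref idx 0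
              then PySem.Set.add ch idx else ch) ch) ch).Nodup := by
  induction rest generalizing ch with
  | nil => exact h
  | cons row rows ih => exact ih _ (pv_inner_nodup _ _ _ _ h)

-- ===== VERDICT (by name: the statement is the Claim_ definition above) =====
theorem changed_lane_indexes_py_spec : Claim_equal_changed_lane_indexes_py := by
  intro vs _ hpre
  unfold Spec_changed_lane_indexes_py
  match vs with
  | [] => exact absurd rfl hpre
  | ref :: rest =>
    unfold changed_lane_indexes_py changed_lane_indexes_py_alt
    simp only
    set count : Int :=
      ((PySem.List.min? ((ref :: rest).map (fun v => (v.length : Int))) (fun x => x)).getD 0) with hc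
    set r := PySem.List.pyRange 0 count 1 with hr
    -- A-side: the append loop is a filter over the range
    rw [PySem.List.foldl_append_ite_eq_filter]
    rw [List.filter_congr (q := pvDiffB rest ref) (by
      intro idx _
      simp only [pvDiffB, List.map_cons]
      rw [Bool.eq_iff_iff, decide_eq_true_iff, pv_card_gt_one_iff, List.any_eq_true]
      constructor
      · rintro ⟨x, hx, hne⟩
        rcases List.mem_map.1 hx with ⟨row, hrow, rfl⟩
        exact ⟨row, hrow, by simpa using hne⟩
      · rintro ⟨row, hrow, hd⟩
        exact ⟨PySem.List.pyGetD row idx 0, List.mem_map.2 ⟨row, hrow, rfl⟩, by simpa using hd⟩)]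
    simp only [List.nil_append]
    -- B-side: sorted of the changed set is that same filtered range
    refine Eq.symm (PySem.List.sorted_eq_of_perm_of_pairwise_lt _ _ (fun x => x) ?_ ?_)
    · rw [List.perm_ext_iff_of_nodup
        ((PySem.List.nodup_pyRange_one 0 count).filter _)
        (pv_outer_nodup ref rest r PySem.Set.empty (by simp [PySem.Set.empty]))]
      intro y
      rw [List.mem_filter, pv_outer_mem]
      simp only [PySem.Set.empty, List.not_mem_nil, false_or, pvDiffB, List.any_eq_true,
        bne_iff_ne, ne_eq]
      exact Iff.rfl
    · exact ((PySem.List.pairwise_lt_pyRange_one 0 count).filter _).imp (fun h => h)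

-- (transliteration note: pyGetD is exact here because every accessed index satisfies
-- 0 ≤ idx < count ≤ len(v), so Python's v[idx] never raises)
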